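-- pv_equiv track=rewrite | github.com/AmauryLBNC/chess_opening | tools/generate_e4_repertoire.py | black_move_allowed
-- ===== SOURCE A (Python) =====
-- from collections import Counter, defaultdict
--
-- def black_move_allowed(
--     key: str,
--     move_uci: str,
--     black_votes: dict[str, Counter[str]],
--     max_black_branches_per_position: int,
-- ) -> bool:
--     if max_black_branches_per_position <= 0:
--         return True
--     ranked = sorted(black_votes[key].items(), key=lambda item: (-item[1], item[0]))
--     allowed = {uci for uci, _count in ranked[:max_black_branches_per_position]}
--     return move_uci in allowed
-- ===== SOURCE B (Python) =====
-- def black_move_allowed(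
--     key,
--     move_uci,
--     black_votes,
--     max_black_branches_per_position,
-- ):
--     if max_black_branches_per_position <= 0:
--         return True
--     c = black_votes[key]
--     if move_uci not in c:
--         return False
--     cnt = c[move_uci]
--     rank = sum(
--         1
--         for u, n in c.items()
--         if n > cnt or (n == cnt and u < move_uci)
--     )
--     return rank < max_black_branches_per_position
-- ===== Notes on version B (the rewrite author's own statement) =====
-- stated objective: simpler
-- what changed: Instead of sorting the whole counter by (-count, uci), slicing the top-k and building a set, B looks the move up once and counts in a single linear pass how many entries rank strictly before it (higher count, or equal count and smaller uci), returning rank < k.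
import Mathlib
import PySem

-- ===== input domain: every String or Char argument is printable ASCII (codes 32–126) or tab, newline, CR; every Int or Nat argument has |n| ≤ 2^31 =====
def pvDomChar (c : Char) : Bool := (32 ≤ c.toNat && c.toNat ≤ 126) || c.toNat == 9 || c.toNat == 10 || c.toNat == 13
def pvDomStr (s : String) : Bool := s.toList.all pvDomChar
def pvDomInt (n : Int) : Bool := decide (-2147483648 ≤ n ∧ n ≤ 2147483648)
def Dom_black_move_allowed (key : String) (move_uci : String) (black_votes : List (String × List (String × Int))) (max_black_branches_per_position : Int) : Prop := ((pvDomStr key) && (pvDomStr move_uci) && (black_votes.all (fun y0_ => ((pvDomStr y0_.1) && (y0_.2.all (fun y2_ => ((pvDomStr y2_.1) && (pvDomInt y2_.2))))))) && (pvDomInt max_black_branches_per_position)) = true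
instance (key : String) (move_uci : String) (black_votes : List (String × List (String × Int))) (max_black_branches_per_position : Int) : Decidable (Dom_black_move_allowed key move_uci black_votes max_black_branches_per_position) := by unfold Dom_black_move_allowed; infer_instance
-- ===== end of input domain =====

-- B replaces A's sort-top-k-and-build-a-set by a single linear pass that counts how many
-- entries rank strictly before the move (simpler, no sort); equal return value on Pre_.


-- ===== PORT A =====
def black_move_allowed (key : String) (move_uci : String) (black_votes : List (String × List (String × Int))) (max_black_branches_per_position : Int) : Bool :=
  if max_black_branches_per_position ≤ 0 then true
  else
    -- black_votes[key] raises KeyError when key is absent: excluded by Pre_ (the [] default is never used there)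
    let c := (PySem.Dict.mk black_votes).getD key []
    let ranked := PySem.List.sorted2 c (fun item => -item.2) (fun item => item.1)
    let allowed := PySem.Set.ofList ((PySem.List.slice ranked none (some max_black_branches_per_position)).map (fun p => p.1))
    PySem.Set.contains allowed move_uci

-- ===== PORT B =====
def black_move_allowed_alt (key : String) (move_uci : String) (black_votes : List (String × List (String × Int))) (max_black_branches_per_position : Int) : Bool :=
  if max_black_branches_per_position ≤ 0 then true
  else
    -- black_votes[key]: same KeyError behaviour as A, excluded by Pre_
    let c := (PySem.Dict.mk black_votes).getD key []
    match (PySem.Dict.mk c).get? move_uci with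
    | none => false
    | some cnt =>
      let rank := c.foldl (fun acc p => if p.2 > cnt ∨ (p.2 = cnt ∧ p.1 < move_uci) then acc + 1 else acc) (0 : Int)
      decide (rank < max_black_branches_per_position)

-- ===== PRECONDITION & SPEC =====
-- Pre_ excludes (when the max<=0 guard does not return early) inputs where black_votes[key]
-- raises KeyError, and association lists with duplicate keys at either level, which do not
-- encode a Python dict/Counter (a Python dict cannot hold duplicate keys).
def Pre_black_move_allowed (key : String) (_move_uci : String) (black_votes : List (String × List (String × Int))) (max_black_branches_per_position : Int) : Prop :=
  max_black_branches_per_position ≤ 0 ∨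
    ((black_votes.map Prod.fst).Nodup ∧ key ∈ black_votes.map Prod.fst ∧
     ∀ p ∈ black_votes, (p.2.map Prod.fst).Nodup)
instance (key : String) (move_uci : String) (black_votes : List (String × List (String × Int))) (max_black_branches_per_position : Int) : Decidable (Pre_black_move_allowed key move_uci black_votes max_black_branches_per_position) := by unfold Pre_black_move_allowed; infer_instance

def pvWitness_black_move_allowed : String × String × (List (String × List (String × Int))) × Int :=
  ("e2e4", "e7e5", [("e2e4", [("e7e5", 3), ("c7c5", 2)])], 1)

def Spec_black_move_allowed (key : String) (move_uci : String) (black_votes : List (String × List (String × Int))) (max_black_branches_per_position : Int) (out : Bool) : Prop := out = black_move_allowed_alt key move_uci black_votes max_black_branches_per_position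
instance (key : String) (move_uci : String) (black_votes : List (String × List (String × Int))) (max_black_branches_per_position : Int) (out : Bool) : Decidable (Spec_black_move_allowed key move_uci black_votes max_black_branches_per_position out) := by unfold Spec_black_move_allowed; infer_instance

-- ===== CLAIM (what is proved, stated in full; the proofs are below) =====
def Claim_equal_black_move_allowed : Prop := ∀ (key : String) (move_uci : String) (black_votes : List (String × List (String × Int))) (max_black_branches_per_position : Int), Dom_black_move_allowed key move_uci black_votes max_black_branches_per_position → Pre_black_move_allowed key move_uci black_votes max_black_branches_per_position → Spec_black_move_allowed key move_uci black_votes max_black_branches_per_position (black_move_allowed key move_uci black_votes max_black_branches_per_position)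

-- ===== LEMMAS AND PROOFS =====

-- the sort key of A's (-count, uci) tuple, as a single lexicographic key
def bmKey (p : String × Int) : Lex (Int × String) := toLex (-p.2, p.1)
lemma sorted2_eq_sorted_bmKey (c : List (String × Int)) :
    PySem.List.sorted2 c (fun item => -item.2) (fun item => item.1) =
      PySem.List.sorted c bmKey := by
  rw [PySem.List.sorted_eq_foldl_insertBy]
  unfold PySem.List.sorted2
  simp only [if_neg (by decide : ¬ (false = true))]
  congr 1
  funext acc x
  congr 1
  funext a b
  show (decide ((-a.2:Int) < -b.2) || (!decide ((-b.2:Int) < -a.2) && decide (a.1 < b.1)))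
      = decide (bmKey a < bmKey b)
  rcases lt_trichotomy (-a.2 : Int) (-b.2) with h | h | h
  · simp [bmKey, Prod.Lex.lt_iff, h, asymm h]
  · simp [bmKey, Prod.Lex.lt_iff, h]
  · simp [bmKey, Prod.Lex.lt_iff, h, asymm h, ne_of_gt h]

lemma pairwise_lt_bmKey (s : List (String × Int))
    (hn : (s.map Prod.fst).Nodup)
    (hp : s.Pairwise (fun a b => bmKey a ≤ bmKey b)) :
    s.Pairwise (fun a b => bmKey a < bmKey b) := by
  rw [List.Nodup, List.pairwise_map] at hn
  refine (hn.and hp).imp ?_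
  rintro a b ⟨hne, hle⟩
  refine lt_of_le_of_ne hle (fun he => hne ?_)
  have := congrArg (fun x => (ofLex x).2) he
  simpa [bmKey] using this

lemma mem_take_iff_countP {α κ : Type} [LinearOrder κ] (K : α → κ) :
    ∀ (s : List α), s.Pairwise (fun a b => K a < K b) → ∀ x ∈ s, ∀ n : Nat,
      (x ∈ s.take n ↔ s.countP (fun y => decide (K y < K x)) < n) := by
  intro s
  induction s with
  | nil => intro _ x hx; cases hx
  | cons a t ih =>
    intro hp x hx n
    rcases List.pairwise_cons.1 hp with ⟨ha, ht⟩
    cases n with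
    | zero => simp
    | succ m =>
      rcases List.mem_cons.1 hx with rfl | hxt
      · have h0 : (x :: t).countP (fun y => decide (K y < K x)) = 0 := by
          rw [List.countP_eq_zero]
          intro y hy
          rcases List.mem_cons.1 hy with rfl | hy
          · simp
          · simp [not_lt.2 (le_of_lt (ha y hy))]
        simp [h0, List.take_succ_cons]
      · have hK : K a < K x := ha x hxt
        have hne : x ≠ a := fun he => absurd hK (by rw [he]; exact lt_irrefl _)
        have ih' := ih ht x hxt m
        simp only [List.take_succ_cons, List.mem_cons, List.countP_cons, hK, decide_true,
          if_true, hne, false_or]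
        rw [ih']
        omega

lemma nodup_getD (black_votes : List (String × List (String × Int))) (key : String)
    (h : ∀ p ∈ black_votes, (p.2.map Prod.fst).Nodup) :
    (((PySem.Dict.mk black_votes).getD key []).map Prod.fst).Nodup := by
  induction black_votes with
  | nil => simp [PySem.Dict.getD, PySem.Dict.get?]
  | cons p rest ih =>
    rw [PySem.Dict.getD, PySem.Dict.get?_mk_cons]
    by_cases he : p.1 == key
    · simpa [he] using h p (by simp)
    · simp only [he, Bool.false_eq_true, if_false]
      rw [← PySem.Dict.getD]
      exact ih (fun q hq => h q (List.mem_cons_of_mem _ hq))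

lemma core (mv : String) (k : Int) (hk : 0 < k) (c : List (String × Int))
    (hn : (c.map Prod.fst).Nodup) :
    PySem.Set.contains
        (PySem.Set.ofList
          ((PySem.List.slice (PySem.List.sorted2 c (fun item => -item.2) (fun item => item.1))
              none (some k)).map (fun p => p.1))) mv =
      (match (PySem.Dict.mk c).get? mv with
        | none => false
        | some cnt =>
          decide ((c.foldl (fun acc p => if p.2 > cnt ∨ (p.2 = cnt ∧ p.1 < mv) then acc + 1 else acc) (0 : Int)) < k)) := by
  rw [sorted2_eq_sorted_bmKey]
  rw [PySem.List.slice_to _ (le_of_lt hk)]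
  have hperm : (PySem.List.sorted c bmKey).Perm c := PySem.List.sorted_perm c bmKey false
  have hsn : ((PySem.List.sorted c bmKey).map Prod.fst).Nodup :=
    ((hperm.map Prod.fst).nodup_iff).2 hn
  have hstrict : (PySem.List.sorted c bmKey).Pairwise (fun a b => bmKey a < bmKey b) :=
    pairwise_lt_bmKey _ hsn (PySem.List.sorted_pairwise c bmKey)
  cases hget : (PySem.Dict.mk c).get? mv with
  | none =>
    have hnm : mv ∉ c.map Prod.fst := by
      have := (PySem.Dict.get?_eq_none_iff_not_mem_keys (PySem.Dict.mk c) mv).1 hget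
      simpa [PySem.Dict.keys_mk] using this
    simp only [PySem.Set.contains]
    rw [Bool.eq_false_iff]
    intro hcon
    have hmem : mv ∈ ((PySem.List.sorted c bmKey).take k.toNat).map (fun p => p.1) := by
      have := List.contains_iff_mem.1 hcon
      exact (PySem.Set.mem_ofList _ _).1 this
    rcases List.mem_map.1 hmem with ⟨y, hy, hy1⟩
    exact hnm (hy1 ▸ List.mem_map_of_mem (hperm.subset (List.take_subset _ _ hy)))
  | some cnt =>
    show _ = decide ((c.foldl (fun acc p => if p.2 > cnt ∨ (p.2 = cnt ∧ p.1 < mv) then acc + 1 else acc) (0 : Int)) < k)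
    have hmemc : (mv, cnt) ∈ c := PySem.Dict.mem_items_of_get?_eq_some (PySem.Dict.mk c) hget
    have hmems : (mv, cnt) ∈ PySem.List.sorted c bmKey := hperm.mem_iff.2 hmemc
    have hiff := mem_take_iff_countP bmKey _ hstrict (mv, cnt) hmems k.toNat
    have hfold : c.foldl (fun acc p => if p.2 > cnt ∨ (p.2 = cnt ∧ p.1 < mv) then acc + 1 else acc) (0 : Int)
        = (List.countP (fun y => decide (bmKey y < bmKey (mv, cnt))) c : Int) := by
      have h1 := PySem.List.foldl_count_if (fun y => decide (bmKey y < bmKey (mv, cnt))) c 0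
      rw [zero_add] at h1
      rw [← h1]
      congr 1
      funext acc p
      have hcond : (p.2 > cnt ∨ (p.2 = cnt ∧ p.1 < mv)) ↔ (decide (bmKey p < bmKey (mv, cnt)) = true) := by
        rw [decide_eq_true_eq]
        show _ ↔ toLex (-p.2, p.1) < toLex (-cnt, mv)
        rw [Prod.Lex.lt_iff]
        show _ ↔ (-p.2 < -cnt ∨ ((-p.2 : Int) = -cnt ∧ p.1 < mv))
        constructor
        · rintro (h | ⟨h1, h2⟩)
          · exact Or.inl (by omega)
          · exact Or.inr ⟨by omega, h2⟩
        · rintro (h | ⟨h1, h2⟩)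
          · exact Or.inl (by omega)
          · exact Or.inr ⟨by omega, h2⟩
      exact if_congr hcond rfl rfl
    rw [hfold]
    simp only [PySem.Set.contains]
    rw [Bool.eq_iff_iff]
    rw [List.contains_iff_mem, PySem.Set.mem_ofList, decide_eq_true_eq]
    have hcount : List.countP (fun y => decide (bmKey y < bmKey (mv, cnt))) (PySem.List.sorted c bmKey)
        = List.countP (fun y => decide (bmKey y < bmKey (mv, cnt))) c := hperm.countP_eq _
    constructor
    · intro hmem
      rcases List.mem_map.1 hmem with ⟨y, hy, hy1⟩
      have hys : y ∈ PySem.List.sorted c bmKey := List.take_subset _ _ hy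
      have hyx : y = (mv, cnt) := List.inj_on_of_nodup_map hsn hys hmems hy1
      have := hiff.1 (hyx ▸ hy)
      rw [hcount] at this
      omega
    · intro hlt
      have hmt : (mv, cnt) ∈ (PySem.List.sorted c bmKey).take k.toNat := by
        apply hiff.2
        rw [hcount]
        omega
      exact List.mem_map_of_mem hmt

-- ===== VERDICT (by name: the statement is the Claim_ definition above) =====
theorem black_move_allowed_spec : Claim_equal_black_move_allowed := by
  intro key mv bv k _hdom hpre
  unfold Spec_black_move_allowed black_move_allowed black_move_allowed_alt
  by_cases hk : k ≤ 0
  · simp [hk]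
  · rcases hpre with h | ⟨_, _, hin⟩
    · exact absurd h hk
    · simp only [if_neg hk]
      exact core mv k (by omega) _ (nodup_getD bv key hin)
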